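-- pv_equiv track=rewrite | github.com/christianwell/get-them-emails | crawler.py | _is_staff_candidate_url
-- ===== SOURCE A (Python) =====
-- def _staff_url_priority(url: str) -> int:
--     lowered = url.lower()
--     score = 0
--     if "staff-directory" in lowered:
--         score += 30
--     if "/staff" in lowered:
--         score += 25
--     if "/faculty" in lowered:
--         score += 20
--     if "/directory" in lowered:
--         score += 15
--     if "staff-search" in lowered or "staffsearch" in lowered:
--         score += 12
--     if "/teacher" in lowered:
--         score += 8
--     if "/people" in lowered:
--         score += 4
--     return score
--
-- def _is_staff_candidate_url(url: str) -> bool: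
--     """Filter to URLs likely to be actual staff directories, not staff documents."""
--     lowered = url.lower()
--     include_markers = [
--         "staff-directory", "staff-search", "staffsearch",
--         "/directory", "/faculty", "/teachers", "/teacher",
--         "/page/staff", "/page/faculty", "/people/staff",
--     ]
--     exclude_markers = [
--         "/documents/", "/doc/", "/files/", "/news/", "/events/",
--         "/for-current-staff", "/current-staff", "/join-our-team",
--         "/salary", "/benefits", "/wellness", "/recruitment", "/retention",
--         "/employment", "/jobs", "/forms", "/handbook", "/policies",
--         "/board", "/calendar", "/contact-hr",
--     ]
--     if any(marker in lowered for marker in exclude_markers):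
--         return False
--     if any(marker in lowered for marker in include_markers):
--         return True
--     return _staff_url_priority(url) >= 15
-- ===== SOURCE B (Python) =====
-- def _is_staff_candidate_url(url: str) -> bool:
--     """Same decision as A: a flat marker test.
--
--     On the fallback path of A every include marker is absent, so the weighted
--     score can only collect 25 for "/staff" and 4 for "/people"; it reaches the
--     threshold 15 exactly when "/staff" occurs.  Hence the whole scoring helper
--     collapses to one extra include marker "/staff".
--     """
--     lowered = url.lower()
--     for marker in (
--         "/documents/", "/doc/", "/files/", "/news/", "/events/",
--         "/for-current-staff", "/current-staff", "/join-our-team",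
--         "/salary", "/benefits", "/wellness", "/recruitment", "/retention",
--         "/employment", "/jobs", "/forms", "/handbook", "/policies",
--         "/board", "/calendar", "/contact-hr",
--     ):
--         if marker in lowered:
--             return False
--     for marker in (
--         "/staff",
--         "staff-directory", "staff-search", "staffsearch",
--         "/directory", "/faculty", "/teachers", "/teacher",
--         "/page/staff", "/page/faculty", "/people/staff",
--     ):
--         if marker in lowered:
--             return True
--     return False
-- ===== Notes on version B (the rewrite author's own statement) =====
-- stated objective: simpler
-- what changed: Drops the weighted-score helper entirely: since on A's fallback path all include markers are absent, the score >= 15 test reduces to checking '/staff', so B is a single flat exclude-then-include substring scan with '/staff' added to the include markers.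
import Mathlib
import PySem

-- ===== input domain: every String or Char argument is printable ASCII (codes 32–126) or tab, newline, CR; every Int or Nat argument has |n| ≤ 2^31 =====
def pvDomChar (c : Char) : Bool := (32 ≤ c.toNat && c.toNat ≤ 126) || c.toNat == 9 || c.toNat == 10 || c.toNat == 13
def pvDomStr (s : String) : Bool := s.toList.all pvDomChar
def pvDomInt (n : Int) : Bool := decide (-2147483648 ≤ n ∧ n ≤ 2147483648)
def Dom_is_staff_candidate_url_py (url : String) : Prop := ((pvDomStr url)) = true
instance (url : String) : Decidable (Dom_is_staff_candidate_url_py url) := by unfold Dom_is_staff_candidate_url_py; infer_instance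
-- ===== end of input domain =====

-- B replaces A's weighted-score fallback by one flat include list (adding "/staff"): simpler, same value everywhere.

-- ===== PORT A =====
def staff_url_priority_py (url : String) : Int :=
  let lowered := PySem.Str.lower url
  let score : Int := 0
  let score := if PySem.Str.isIn "staff-directory" lowered then score + 30 else score
  let score := if PySem.Str.isIn "/staff" lowered then score + 25 else score
  let score := if PySem.Str.isIn "/faculty" lowered then score + 20 else score
  let score := if PySem.Str.isIn "/directory" lowered then score + 15 else score
  let score := if PySem.Str.isIn "staff-search" lowered || PySem.Str.isIn "staffsearch" lowered then score + 12 else score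
  let score := if PySem.Str.isIn "/teacher" lowered then score + 8 else score
  let score := if PySem.Str.isIn "/people" lowered then score + 4 else score
  score

def is_staff_candidate_url_py (url : String) : Bool :=
  let lowered := PySem.Str.lower url
  let include_markers : List String :=
    ["staff-directory", "staff-search", "staffsearch",
     "/directory", "/faculty", "/teachers", "/teacher",
     "/page/staff", "/page/faculty", "/people/staff"]
  let exclude_markers : List String :=
    ["/documents/", "/doc/", "/files/", "/news/", "/events/",
     "/for-current-staff", "/current-staff", "/join-our-team",
     "/salary", "/benefits", "/wellness", "/recruitment", "/retention",
     "/employment", "/jobs", "/forms", "/handbook", "/policies",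
     "/board", "/calendar", "/contact-hr"]
  if exclude_markers.any (fun marker => PySem.Str.isIn marker lowered) then false
  else if include_markers.any (fun marker => PySem.Str.isIn marker lowered) then true
  else decide (staff_url_priority_py url ≥ 15)

-- ===== PORT B =====
-- B's 'for marker in (…): if marker in lowered: return True/False' early-return loop
def pvFirstHit (markers : List String) (lowered : String) : Bool :=
  match markers with
  | [] => false
  | m :: rest => if PySem.Str.isIn m lowered then true else pvFirstHit rest lowered

def is_staff_candidate_url_py_alt (url : String) : Bool :=
  let lowered := PySem.Str.lower url
  if pvFirstHit
      ["/documents/", "/doc/", "/files/", "/news/", "/events/",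
       "/for-current-staff", "/current-staff", "/join-our-team",
       "/salary", "/benefits", "/wellness", "/recruitment", "/retention",
       "/employment", "/jobs", "/forms", "/handbook", "/policies",
       "/board", "/calendar", "/contact-hr"] lowered then false
  else if pvFirstHit
      ["/staff",
       "staff-directory", "staff-search", "staffsearch",
       "/directory", "/faculty", "/teachers", "/teacher",
       "/page/staff", "/page/faculty", "/people/staff"] lowered then true
  else false

-- ===== PRECONDITION & SPEC =====
def Spec_is_staff_candidate_url_py (url : String) (out : Bool) : Prop := out = is_staff_candidate_url_py_alt url
instance (url : String) (out : Bool) : Decidable (Spec_is_staff_candidate_url_py url out) := by unfold Spec_is_staff_candidate_url_py; infer_instance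

-- ===== CLAIM (what is proved, stated in full; the proofs are below) =====
def Claim_equal_is_staff_candidate_url_py : Prop := ∀ (url : String), Dom_is_staff_candidate_url_py url → Spec_is_staff_candidate_url_py url (is_staff_candidate_url_py url)

-- ===== LEMMAS AND PROOFS =====
theorem pvFirstHit_eq_any (markers : List String) (lowered : String) :
    pvFirstHit markers lowered = markers.any (fun m => PySem.Str.isIn m lowered) := by
  induction markers with
  | nil => rfl
  | cons m rest ih =>
    simp only [pvFirstHit, List.any_cons, ih]
    cases PySem.Str.isIn m lowered <;> simp

-- ===== VERDICT (by name: the statement is the Claim_ definition above) =====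
-- ===== VERDICT (by name: the statement is the Claim_ definition above) =====
-- ===== VERDICT (by name: the statement is the Claim_ definition above) =====
set_option maxHeartbeats 1000000 in
theorem is_staff_candidate_url_py_spec : Claim_equal_is_staff_candidate_url_py := by
  intro url _
  show is_staff_candidate_url_py url = is_staff_candidate_url_py_alt url
  simp only [is_staff_candidate_url_py, is_staff_candidate_url_py_alt, staff_url_priority_py,
    pvFirstHit_eq_any, List.any_cons, List.any_nil, Bool.or_false]
  rcases Bool.dichotomy (PySem.Str.isIn "/documents/" (PySem.Str.lower url) ||
      (PySem.Str.isIn "/doc/" (PySem.Str.lower url) ||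
      (PySem.Str.isIn "/files/" (PySem.Str.lower url) ||
      (PySem.Str.isIn "/news/" (PySem.Str.lower url) ||
      (PySem.Str.isIn "/events/" (PySem.Str.lower url) ||
      (PySem.Str.isIn "/for-current-staff" (PySem.Str.lower url) ||
      (PySem.Str.isIn "/current-staff" (PySem.Str.lower url) ||
      (PySem.Str.isIn "/join-our-team" (PySem.Str.lower url) ||
      (PySem.Str.isIn "/salary" (PySem.Str.lower url) ||
      (PySem.Str.isIn "/benefits" (PySem.Str.lower url) ||
      (PySem.Str.isIn "/wellness" (PySem.Str.lower url) ||
      (PySem.Str.isIn "/recruitment" (PySem.Str.lower url) ||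
      (PySem.Str.isIn "/retention" (PySem.Str.lower url) ||
      (PySem.Str.isIn "/employment" (PySem.Str.lower url) ||
      (PySem.Str.isIn "/jobs" (PySem.Str.lower url) ||
      (PySem.Str.isIn "/forms" (PySem.Str.lower url) ||
      (PySem.Str.isIn "/handbook" (PySem.Str.lower url) ||
      (PySem.Str.isIn "/policies" (PySem.Str.lower url) ||
      (PySem.Str.isIn "/board" (PySem.Str.lower url) ||
      (PySem.Str.isIn "/calendar" (PySem.Str.lower url) ||
       PySem.Str.isIn "/contact-hr" (PySem.Str.lower url))))))))))))))))))))) with hE | hE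
  case inr => rw [hE]; rfl
  rw [hE, if_neg (show ¬(false = true) by decide), if_neg (show ¬(false = true) by decide)]
  rcases Bool.dichotomy (PySem.Str.isIn "staff-directory" (PySem.Str.lower url) ||
      (PySem.Str.isIn "staff-search" (PySem.Str.lower url) ||
      (PySem.Str.isIn "staffsearch" (PySem.Str.lower url) ||
      (PySem.Str.isIn "/directory" (PySem.Str.lower url) ||
      (PySem.Str.isIn "/faculty" (PySem.Str.lower url) ||
      (PySem.Str.isIn "/teachers" (PySem.Str.lower url) ||
      (PySem.Str.isIn "/teacher" (PySem.Str.lower url) ||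
      (PySem.Str.isIn "/page/staff" (PySem.Str.lower url) ||
      (PySem.Str.isIn "/page/faculty" (PySem.Str.lower url) ||
       PySem.Str.isIn "/people/staff" (PySem.Str.lower url)))))))))) with hI | hI
  case inr => rw [hI, Bool.or_true]; rfl
  rw [hI, Bool.or_false]
  rcases Bool.or_eq_false_iff.mp hI with ⟨i1, hI⟩
  rcases Bool.or_eq_false_iff.mp hI with ⟨i2, hI⟩
  rcases Bool.or_eq_false_iff.mp hI with ⟨i3, hI⟩
  rcases Bool.or_eq_false_iff.mp hI with ⟨i4, hI⟩
  rcases Bool.or_eq_false_iff.mp hI with ⟨i5, hI⟩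
  rcases Bool.or_eq_false_iff.mp hI with ⟨_, hI⟩
  rcases Bool.or_eq_false_iff.mp hI with ⟨i7, hI⟩
  rcases Bool.dichotomy (PySem.Str.isIn "/staff" (PySem.Str.lower url)) with hs | hs <;>
    rcases Bool.dichotomy (PySem.Str.isIn "/people" (PySem.Str.lower url)) with hp | hp <;>
    simp only [i1, i2, i3, i4, i5, i7, hs, hp] <;> rfl
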